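-- pv_equiv track=rewrite | github.com/KevinSRR/UniCMR | UniCMR/preprocess.py | _merge_edus
-- ===== SOURCE A (Python) =====
-- def _merge_edus(edus):
--     special_toks = ['if ', 'and ', 'or ', 'to ', 'unless ', 'but ', 'as ', 'except ']
--     special_puncts = ['.', ':', ',',]
--     spt_idx = []
--     for idx, edu in enumerate(edus):
--         if idx == 0:
--             continue
--         is_endwith = False
--         for special_punct in special_puncts:
--             if edus[idx-1].strip().endswith(special_punct):
--                 is_endwith = True
--         is_startwith = False
--         for special_tok in special_toks:
--             if edu.startswith(special_tok):
--                 is_startwith = True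
--         if (not is_endwith) and (not is_startwith):
--             spt_idx.append(idx)
--     edus_spt = []
--     for idx, edu in enumerate(edus):
--         if idx not in spt_idx or idx == 0:
--             edus_spt.append(edu)
--         else:
--             edus_spt[-1] += ' ' + edu
--     return edus_spt
-- ===== SOURCE B (Python) =====
-- def _merge_edus(edus):
--     special_toks = ('if ', 'and ', 'or ', 'to ', 'unless ', 'but ', 'as ', 'except ')
--     special_puncts = ('.', ':', ',')
--     if not edus:
--         return []
--     segs_rev = [edus[-1]]
--     for prev, cur in zip(reversed(edus[:-1]), reversed(edus[1:])):
--         if prev.strip().endswith(special_puncts) or cur.startswith(special_toks):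
--             segs_rev.append(prev)
--         else:
--             segs_rev[-1] = prev + ' ' + segs_rev[-1]
--     return segs_rev[::-1]
-- ===== Notes on version B (the rewrite author's own statement) =====
-- stated objective: faster
-- what changed: A makes two forward passes: it first collects a list of merge indices and then rebuilds the output with an 'idx in spt_idx' list-membership scan per element; B makes a single BACKWARD pass over zipped (prev, cur) pairs, building the segment list in reverse (prepending into the current segment's head) and reversing once at the end, with no index list and no membership scans.
import Mathlib
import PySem

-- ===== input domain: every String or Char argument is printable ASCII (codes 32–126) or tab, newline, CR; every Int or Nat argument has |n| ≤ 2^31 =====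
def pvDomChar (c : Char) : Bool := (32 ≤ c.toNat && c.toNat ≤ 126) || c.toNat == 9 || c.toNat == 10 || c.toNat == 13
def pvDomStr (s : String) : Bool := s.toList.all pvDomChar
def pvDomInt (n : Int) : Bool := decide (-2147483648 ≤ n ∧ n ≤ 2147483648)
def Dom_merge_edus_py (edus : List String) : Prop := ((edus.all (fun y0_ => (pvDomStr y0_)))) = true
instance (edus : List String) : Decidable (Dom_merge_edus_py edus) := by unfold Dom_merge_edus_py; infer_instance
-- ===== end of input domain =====

-- B replaces A's two forward passes (collect merge indices, then rebuild with a per-element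
-- membership scan) by one backward pass over (prev, cur) pairs that builds the segment list
-- in reverse and reverses it once at the end; objective: faster (measured by the check).

-- ===== PORT A =====
def pvA_special_toks : List String :=
  ["if ", "and ", "or ", "to ", "unless ", "but ", "as ", "except "]
def pvA_special_puncts : List String := [".", ":", ","]

-- edus[idx-1]: idx ≥ 1 is always in range, so pyGetD with default "" is exact there.
-- edus_spt[-1] += ' ' + edu: edus_spt is nonempty whenever this branch runs (idx 0 is
-- always appended), so dropLast ++ [getLast?.getD "" ++ …] is exact.
def merge_edus_py (edus : List String) : List String :=
  let spt_idx : List Int :=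
    (PySem.List.enumerate edus).foldl (fun acc p =>
      if p.1 = 0 then acc
      else
        let is_endwith := pvA_special_puncts.foldl (fun b q =>
          if PySem.Str.endswith (PySem.Str.strip (PySem.List.pyGetD edus (p.1 - 1) "")) q
          then true else b) false
        let is_startwith := pvA_special_toks.foldl (fun b t =>
          if PySem.Str.startswith p.2 t then true else b) false
        if !is_endwith && !is_startwith then acc ++ [p.1] else acc) []
  (PySem.List.enumerate edus).foldl (fun out p =>
    if p.1 ∉ spt_idx ∨ p.1 = 0 then out ++ [p.2]
    else out.dropLast ++ [(out.getLast?.getD "") ++ " " ++ p.2]) []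

-- ===== PORT B =====
def pvB_special_toks : List String :=
  ["if ", "and ", "or ", "to ", "unless ", "but ", "as ", "except "]
def pvB_special_puncts : List String := [".", ":", ","]

-- prev.strip().endswith(special_puncts) or cur.startswith(special_toks)
def pvBoundary (prev cur : String) : Bool :=
  pvB_special_puncts.any (fun q => PySem.Str.endswith (PySem.Str.strip prev) q)
  || pvB_special_toks.any (fun t => PySem.Str.startswith cur t)

-- loop body of B: append a fresh segment, or prepend prev into the head of the
-- current segment (which sits LAST in the reversed segment list)
def pvStepB (out : List String) (pc : String × String) : List String :=
  if pvBoundary pc.1 pc.2 then out ++ [pc.1]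
  else out.dropLast ++ [pc.1 ++ " " ++ (out.getLast?.getD "")]

-- segs_rev[-1] = …: segs_rev is never empty (starts as [edus[-1]]), so
-- dropLast ++ […getLast?.getD ""…] is exact.
def merge_edus_py_alt (edus : List String) : List String :=
  match edus with
  | [] => []
  | _ :: _ =>
    let pairs := List.zip ((PySem.List.slice edus none (some (-1))).reverse)
                          ((PySem.List.slice edus (some 1) none).reverse)
    (pairs.foldl pvStepB [(PySem.List.pyGet? edus (-1)).getD ""]).reverse

-- ===== PRECONDITION & SPEC =====
def Spec_merge_edus_py (edus : List String) (out : List String) : Prop := out = merge_edus_py_alt edus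
instance (edus : List String) (out : List String) : Decidable (Spec_merge_edus_py edus out) := by unfold Spec_merge_edus_py; infer_instance

-- ===== CLAIM (what is proved, stated in full; the proofs are below) =====
def Claim_equal_merge_edus_py : Prop := ∀ (edus : List String), Dom_merge_edus_py edus → Spec_merge_edus_py edus (merge_edus_py edus)

-- ===== LEMMAS AND PROOFS =====

-- A's merge-blocking condition at enumerate pair p (p.1 ≥ 1)
def pvCondA (edus : List String) (p : Int × String) : Bool :=
  pvA_special_puncts.any
    (fun q => PySem.Str.endswith (PySem.Str.strip (PySem.List.pyGetD edus (p.1 - 1) "")) q)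
  || pvA_special_toks.any (fun t => PySem.Str.startswith p.2 t)

-- A's second pass, with the spt_idx membership already resolved into pvCondA
def pvStepA (edus : List String) (out : List String) (p : Int × String) : List String :=
  if p.1 = 0 then out ++ [p.2]
  else if pvCondA edus p then out ++ [p.2]
  else out.dropLast ++ [(out.getLast?.getD "") ++ " " ++ p.2]

-- the forward merging recursion: seg = text accumulated for the current segment,
-- prev = the ORIGINAL previous edu (what A strips and tests)
def pvGoAcc (seg prev : String) (rest : List String) : List String :=
  match rest with
  | [] => [seg]
  | c :: rs => if pvBoundary prev c then seg :: pvGoAcc c c rs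
               else pvGoAcc (seg ++ " " ++ c) c rs

-- the right-recursion B realises backwards
def pvGo (prev : String) (rest : List String) : List String :=
  match rest with
  | [] => [prev]
  | c :: rs =>
    let segs := pvGo c rs
    if pvBoundary prev c then prev :: segs
    else match segs with
      | s :: ss => (prev ++ " " ++ s) :: ss
      | [] => [prev]

theorem pvSptIdx (edus : List String) :
    (PySem.List.enumerate edus).foldl (fun acc p =>
      if p.1 = 0 then acc
      else
        let is_endwith := pvA_special_puncts.foldl (fun b q =>
          if PySem.Str.endswith (PySem.Str.strip (PySem.List.pyGetD edus (p.1 - 1) "")) q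
          then true else b) false
        let is_startwith := pvA_special_toks.foldl (fun b t =>
          if PySem.Str.startswith p.2 t then true else b) false
        if !is_endwith && !is_startwith then acc ++ [p.1] else acc) []
    = ((PySem.List.enumerate edus).filter
        (fun p => !(p.1 == 0) && !(pvCondA edus p))).map (·.1) := by
  have h1 := List.foldl_ext
    (l := PySem.List.enumerate edus)
    (fun acc (p : Int × String) =>
      if p.1 = 0 then acc
      else
        let is_endwith := pvA_special_puncts.foldl (fun b q =>
          if PySem.Str.endswith (PySem.Str.strip (PySem.List.pyGetD edus (p.1 - 1) "")) q
          then true else b) false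
        let is_startwith := pvA_special_toks.foldl (fun b t =>
          if PySem.Str.startswith p.2 t then true else b) false
        if !is_endwith && !is_startwith then acc ++ [p.1] else acc)
    (fun acc (p : Int × String) =>
      if (!(p.1 == 0) && !(pvCondA edus p)) then acc ++ [p.1] else acc)
    ([] : List Int)
    (by
      intro acc p _
      by_cases h : p.1 = 0
      · simp [h]
      · simp only [if_neg h, PySem.List.foldl_if_true_eq, Bool.false_or]
        have hb : (p.1 == 0) = false := by simpa using h
        simp [hb, pvCondA, Bool.not_or])
  rw [h1, PySem.List.foldl_append_if]
  simp

theorem pvMemSpt (edus : List String) (k : Nat) (hk : k < edus.length) :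
    ((k : Int) ∈ ((PySem.List.enumerate edus).filter
        (fun p => !(p.1 == 0) && !(pvCondA edus p))).map (·.1))
    ↔ (k ≠ 0 ∧ pvCondA edus ((k : Int), edus[k]) = false) := by
  simp only [List.mem_map, List.mem_filter]
  constructor
  · rintro ⟨p, ⟨hp, hf⟩, hfst⟩
    obtain ⟨j, hj, rfl⟩ := (PySem.List.mem_enumerate_iff edus 0 p).mp hp
    simp only [zero_add] at hf hfst
    have hjk : j = k := by exact_mod_cast hfst
    subst hjk
    simp only [Bool.and_eq_true, Bool.not_eq_true', beq_eq_false_iff_ne, ne_eq] at hf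
    exact ⟨by exact_mod_cast hf.1, hf.2⟩
  · rintro ⟨h0, hc⟩
    refine ⟨((k : Int), edus[k]), ⟨?_, ?_⟩, by simp⟩
    · exact (PySem.List.mem_enumerate_iff edus 0 _).mpr ⟨k, hk, by simp⟩
    · simp only [Bool.and_eq_true, Bool.not_eq_true', beq_eq_false_iff_ne, ne_eq, hc]
      exact ⟨by exact_mod_cast h0, trivial⟩

-- A's whole program is the pvStepA fold
theorem pvA_simpl (edus : List String) :
    merge_edus_py edus = (PySem.List.enumerate edus).foldl (pvStepA edus) [] := by
  unfold merge_edus_py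
  rw [pvSptIdx]
  apply List.foldl_ext
  intro acc p hp
  obtain ⟨k, hk, rfl⟩ := (PySem.List.mem_enumerate_iff edus 0 p).mp hp
  simp only [zero_add]
  unfold pvStepA
  by_cases h0 : k = 0
  · subst h0; simp
  · have hne : ((k : Nat) : Int) ≠ 0 := by exact_mod_cast h0
    have hmem := pvMemSpt edus k hk
    rw [if_neg hne]
    by_cases hc : pvCondA edus ((k : Int), edus[k]) = true
    · rw [if_pos hc, if_pos (Or.inl (fun hm => by
        have := (hmem.mp hm).2
        rw [this] at hc
        exact Bool.false_ne_true hc))]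
    · have hcf : pvCondA edus ((k : Int), edus[k]) = false := by simpa using hc
      rw [if_neg hc, if_neg (by
        push Not
        exact ⟨hmem.mpr ⟨h0, hcf⟩, hne⟩)]

-- the pvStepA fold over the tail, started after index n, is pvGoAcc
theorem pvA_fold (edus : List String) (rest : List String) :
    ∀ (n : Nat) (prev seg : String) (acc : List String),
      List.drop n edus = prev :: rest →
      (PySem.List.enumerate rest ((n : Int) + 1)).foldl (pvStepA edus) (acc ++ [seg])
        = acc ++ pvGoAcc seg prev rest := by
  induction rest with
  | nil => intro n prev seg acc _; simp [PySem.List.enumerate_nil, pvGoAcc]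
  | cons c rs ih =>
    intro n prev seg acc hdrop
    have hget : edus[n]? = some prev := by
      have h := congrArg (fun l : List String => l[0]?) hdrop
      simpa [List.getElem?_drop] using h
    have hdrop1 : List.drop (n + 1) edus = c :: rs := by
      have : List.drop 1 (List.drop n edus) = List.drop (n + 1) edus := by
        rw [List.drop_drop]
      rw [← this, hdrop]; simp
    have hprev : PySem.List.pyGetD edus ((n : Int) + 1 - 1) "" = prev := by
      have h1 : ((n : Int) + 1 - 1) = (n : Int) := by ring
      rw [h1, PySem.List.pyGetD_natCast]
      simp [List.getD, hget]
    have hcond : pvCondA edus (((n : Int) + 1), c) = pvBoundary prev c := by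
      simp [pvCondA, pvBoundary, pvA_special_puncts, pvB_special_puncts,
        pvA_special_toks, pvB_special_toks, hget]
    have hne : ((n : Int) + 1) ≠ 0 := by omega
    have hcast : (n : Int) + 1 + 1 = ((n + 1 : Nat) : Int) + 1 := by push_cast; ring
    have hstep : pvStepA edus (acc ++ [seg]) (((n : Int) + 1), c) =
        (if pvBoundary prev c then (acc ++ [seg]) ++ [c]
         else acc ++ [seg ++ " " ++ c]) := by
      unfold pvStepA
      rw [if_neg hne]
      simp only [hcond]
      by_cases hb : pvBoundary prev c = true
      · simp [hb]
      · simp [hb]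
    rw [PySem.List.enumerate_cons, List.foldl_cons, hstep]
    by_cases hb : pvBoundary prev c = true
    · rw [if_pos hb, hcast, ih (n + 1) c c (acc ++ [seg]) hdrop1]
      simp [pvGoAcc, hb]
    · rw [if_neg hb, hcast, ih (n + 1) c (seg ++ " " ++ c) acc hdrop1]
      simp [pvGoAcc, hb]

theorem pvA_eq_goAcc (e : String) (es : List String) :
    merge_edus_py (e :: es) = pvGoAcc e e es := by
  rw [pvA_simpl]
  rw [show PySem.List.enumerate (e :: es) = (0, e) :: PySem.List.enumerate es 1 from
    PySem.List.enumerate_cons e es 0]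
  rw [List.foldl_cons]
  have h0 : pvStepA (e :: es) [] (0, e) = [] ++ [e] := by simp [pvStepA]
  rw [h0]
  have := pvA_fold (e :: es) es 0 e e [] (by simp)
  simpa using this

-- head-shift: pvGoAcc's result is its seg argument extended by a fixed suffix, then a fixed tail
theorem pvGoAcc_shift (rs : List String) :
    ∀ (prev : String), ∃ x t, ∀ s, pvGoAcc s prev rs = (s ++ x) :: t := by
  induction rs with
  | nil =>
    intro prev
    exact ⟨"", [], fun s => by simp [pvGoAcc]⟩
  | cons c rs ih =>
    intro prev
    by_cases hb : pvBoundary prev c = true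
    · exact ⟨"", pvGoAcc c c rs, fun s => by simp [pvGoAcc, hb]⟩
    · obtain ⟨x, t, hx⟩ := ih c
      exact ⟨" " ++ c ++ x, t, fun s => by
        simp [pvGoAcc, hb, hx, String.append_assoc]⟩

theorem pvGo_eq_goAcc (rs : List String) :
    ∀ (prev : String), pvGo prev rs = pvGoAcc prev prev rs := by
  induction rs with
  | nil => intro prev; simp [pvGo, pvGoAcc]
  | cons c rs ih =>
    intro prev
    by_cases hb : pvBoundary prev c = true
    · simp [pvGo, pvGoAcc, hb, ih c]
    · obtain ⟨x, t, hx⟩ := pvGoAcc_shift rs c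
      have h1 : pvGo c rs = (c ++ x) :: t := by rw [ih c, hx]
      simp [pvGo, pvGoAcc, hb, h1, hx, String.append_assoc]

theorem pvGo_ne_nil (prev : String) (rs : List String) : pvGo prev rs ≠ [] := by
  cases rs with
  | nil => simp [pvGo]
  | cons c rs =>
    unfold pvGo
    by_cases hb : pvBoundary prev c = true
    · simp [hb]
    · simp only [hb]
      cases pvGo c rs <;> simp

-- B's backward fold computes pvGo reversed
theorem pvB_fold (es : List String) :
    ∀ (e : String),
      (List.zip ((e :: es).dropLast.reverse) ((e :: es).tail.reverse)).foldl pvStepB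
        [((e :: es).getLast?.getD "")] = (pvGo e es).reverse := by
  induction es with
  | nil => intro e; simp [pvGo]
  | cons c rs ih =>
    intro e
    have hdl : (e :: c :: rs).dropLast = e :: (c :: rs).dropLast := by
      simp [List.dropLast]
    have hlen : ((c :: rs).dropLast.reverse).length = (rs.reverse).length := by
      simp
    have hzip : List.zip ((e :: c :: rs).dropLast.reverse) ((e :: c :: rs).tail.reverse)
        = List.zip ((c :: rs).dropLast.reverse) ((c :: rs).tail.reverse) ++ [(e, c)] := by
      rw [hdl]
      simp only [List.reverse_cons, List.tail_cons]
      rw [List.zip_append hlen]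
      simp
    rw [hzip, List.foldl_append]
    have hlast : (e :: c :: rs).getLast?.getD "" = (c :: rs).getLast?.getD "" := by
      simp [List.getLast?_cons_cons]
    rw [hlast, ih c]
    simp only [List.foldl_cons, List.foldl_nil]
    obtain ⟨s, ss, hs⟩ : ∃ s ss, pvGo c rs = s :: ss := by
      cases h : pvGo c rs with
      | nil => exact absurd h (pvGo_ne_nil c rs)
      | cons s ss => exact ⟨s, ss, rfl⟩
    unfold pvStepB
    by_cases hb : pvBoundary e c = true
    · rw [if_pos hb]
      simp [pvGo, hb]
    · rw [if_neg hb]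
      rw [hs]
      simp only [List.reverse_cons, List.dropLast_concat, List.getLast?_concat,
        Option.getD_some]
      have : pvGo e (c :: rs) = (e ++ " " ++ s) :: ss := by
        unfold pvGo
        rw [hs]
        simp [hb]
      rw [this]
      simp

-- ===== VERDICT (by name: the statement is the Claim_ definition above) =====
theorem merge_edus_py_spec : Claim_equal_merge_edus_py := by
  intro edus _
  unfold Spec_merge_edus_py
  cases edus with
  | nil => rfl
  | cons e es =>
    rw [pvA_eq_goAcc, ← pvGo_eq_goAcc]
    have halt : merge_edus_py_alt (e :: es) =
        ((List.zip ((PySem.List.slice (e :: es) none (some (-1))).reverse)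
            ((PySem.List.slice (e :: es) (some 1) none).reverse)).foldl pvStepB
          [(PySem.List.pyGet? (e :: es) (-1)).getD ""]).reverse := rfl
    rw [halt, PySem.List.slice_to_neg_one, PySem.List.slice_from_one,
      PySem.List.pyGet?_neg_one, pvB_fold es e, List.reverse_reverse]
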